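-- pv_equiv track=rewrite | github.com/sternskr/WordatroCheater | wordatro.py | _can_form_word_with_wildcards
-- ===== SOURCE A (Python) =====
-- from collections import defaultdict, Counter
--
-- def _can_form_word_with_wildcards(word: str, available_letters: Counter, wildcards: int) -> bool:
--     """Check if word can be formed using available letters plus wildcards."""
--     word_counts = Counter(word.upper())
--     wildcards_needed = 0
--
--     for letter, needed in word_counts.items():
--         available = available_letters.get(letter, 0)
--         if available < needed:
--             wildcards_needed += needed - available
--
--     return wildcards_needed <= wildcards
-- ===== SOURCE B (Python) =====
-- def _can_form_word_with_wildcards(word: str, available_letters, wildcards: int) -> bool: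
--     """Walk the word once, taking each letter from a mutable copy of the pool
--     and spending a wildcard whenever the pool has none of that letter left."""
--     pool = dict(available_letters)
--     wildcards_needed = 0
--     for ch in word.upper():
--         if pool.get(ch, 0) > 0:
--             pool[ch] -= 1
--         else:
--             wildcards_needed += 1
--     return wildcards_needed <= wildcards
-- ===== Notes on version B (the rewrite author's own statement) =====
-- stated objective: alternative
-- what changed: Replaces A's Counter(word)-then-loop-over-distinct-letters deficit sum by a single character-by-character pass over word.upper() that takes letters from a mutable copy of the pool and spends one wildcard per uncovered character; Pre_ excludes inputs where a character of word.upper() has a negative count in the pool, a degenerate letter pool on which A additionally charges the negative balance as extra wildcards while B charges one wildcard per missing letter.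
-- outside the precondition, e.g. on _can_form_word_with_wildcards('A', {'A': -1}, 1): A returns False, B returns True; on _can_form_word_with_wildcards('AB', {'A': -2, 'B': 1}, 2): A returns False, B returns True
import Mathlib
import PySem

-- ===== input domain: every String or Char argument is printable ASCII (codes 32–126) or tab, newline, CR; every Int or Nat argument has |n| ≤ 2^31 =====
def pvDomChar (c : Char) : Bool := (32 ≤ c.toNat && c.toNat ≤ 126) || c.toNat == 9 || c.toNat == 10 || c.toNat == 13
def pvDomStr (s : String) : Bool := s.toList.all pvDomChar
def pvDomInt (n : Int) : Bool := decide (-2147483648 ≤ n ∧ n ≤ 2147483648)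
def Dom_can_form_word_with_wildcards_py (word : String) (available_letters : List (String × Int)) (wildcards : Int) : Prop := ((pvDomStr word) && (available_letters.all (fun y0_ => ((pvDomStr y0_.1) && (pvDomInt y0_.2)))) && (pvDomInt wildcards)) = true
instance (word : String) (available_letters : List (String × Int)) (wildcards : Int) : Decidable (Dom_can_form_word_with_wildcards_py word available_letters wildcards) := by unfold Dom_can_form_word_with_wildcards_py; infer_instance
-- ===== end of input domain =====

-- B replaces A's Counter-over-distinct-letters deficit sum by a single pass over the
-- word's characters that takes letters from a mutable copy of the pool (objective:
-- alternative decomposition; same asymptotic cost).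

-- ===== PORT A =====
def can_form_word_with_wildcards_py (word : String) (available_letters : List (String × Int)) (wildcards : Int) : Bool :=
  let word_counts := PySem.Dict.counter ((PySem.Str.upper word).toList.map (fun c => c.toString))
  let wildcards_needed :=
    word_counts.items.foldl (fun acc p =>
      let available := (PySem.Dict.mk available_letters).getD p.1 0
      if available < p.2 then acc + (p.2 - available) else acc) (0 : Int)
  decide (wildcards_needed ≤ wildcards)

-- ===== PORT B =====
def can_form_word_with_wildcards_py_alt (word : String) (available_letters : List (String × Int)) (wildcards : Int) : Bool :=
  let res := ((PySem.Str.upper word).toList.map (fun c => c.toString)).foldl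
    (fun (st : PySem.Dict String Int × Int) (ch : String) =>
      if st.1.getD ch 0 > 0 then (st.1.insert ch (st.1.getD ch 0 - 1), st.2)
      else (st.1, st.2 + 1))
    (PySem.Dict.mk available_letters, (0 : Int))
  decide (res.2 ≤ wildcards)

-- ===== PRECONDITION & SPEC =====
-- Pre_ excludes inputs where some character of word.upper() carries a NEGATIVE count in the
-- pool (A still returns there, but a negative letter count is a degenerate pool: A charges the
-- negative balance as extra wildcards, B charges one wildcard per missing letter; neither
-- value is specified).
def Pre_can_form_word_with_wildcards_py (word : String) (available_letters : List (String × Int)) (wildcards : Int) : Prop :=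
  ((PySem.Str.upper word).toList.all
    (fun c => decide (0 ≤ (PySem.Dict.mk available_letters).getD c.toString 0))) = true
instance (word : String) (available_letters : List (String × Int)) (wildcards : Int) : Decidable (Pre_can_form_word_with_wildcards_py word available_letters wildcards) := by unfold Pre_can_form_word_with_wildcards_py; infer_instance

def pvWitness_can_form_word_with_wildcards_py : String × (List (String × Int)) × Int :=
  ("AB", [("A", 1)], 1)

def Spec_can_form_word_with_wildcards_py (word : String) (available_letters : List (String × Int)) (wildcards : Int) (out : Bool) : Prop := out = can_form_word_with_wildcards_py_alt word available_letters wildcards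
instance (word : String) (available_letters : List (String × Int)) (wildcards : Int) (out : Bool) : Decidable (Spec_can_form_word_with_wildcards_py word available_letters wildcards out) := by unfold Spec_can_form_word_with_wildcards_py; infer_instance

-- ===== CLAIM (what is proved, stated in full; the proofs are below) =====
def Claim_equal_can_form_word_with_wildcards_py : Prop := ∀ (word : String) (available_letters : List (String × Int)) (wildcards : Int), Dom_can_form_word_with_wildcards_py word available_letters wildcards → Pre_can_form_word_with_wildcards_py word available_letters wildcards → Spec_can_form_word_with_wildcards_py word available_letters wildcards (can_form_word_with_wildcards_py word available_letters wildcards)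

-- ===== LEMMAS AND PROOFS =====

-- B's loop step, abstracted.
def pvStep (st : PySem.Dict String Int × Int) (ch : String) : PySem.Dict String Int × Int :=
  if st.1.getD ch 0 > 0 then (st.1.insert ch (st.1.getD ch 0 - 1), st.2)
  else (st.1, st.2 + 1)

-- changing a function at a single member of a duplicate-free list shifts the sum by the delta there
lemma pv_sum_map_update (f g : String → Int) (S : List String) (hS : S.Nodup) (x : String)
    (hx : x ∈ S) (h : ∀ k ∈ S, k ≠ x → f k = g k) :
    (S.map g).sum = (S.map f).sum + (g x - f x) := by
  induction S with
  | nil => cases hx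
  | cons a S ih =>
    simp only [List.nodup_cons] at hS
    rcases List.mem_cons.mp hx with rfl | hxS
    · have : S.map g = S.map f := List.map_congr_left (fun k hk => (h k (List.mem_cons_of_mem _ hk) (fun hkx => hS.1 (hkx ▸ hk))).symm)
      simp [this]; ring
    · have ha : f a = g a := h a (List.mem_cons_self) (fun hax => hS.1 (hax ▸ hxS))
      have := ih hS.2 hxS (fun k hk hkx => h k (List.mem_cons_of_mem _ hk) hkx)
      simp only [List.map_cons, List.sum_cons, this, ← ha]; ring

-- characterisation of B's fold over a nonnegative pool: remaining map and wildcard count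
lemma pv_bfold (d0 : PySem.Dict String Int) (l : List String) (h0 : ∀ k ∈ l, 0 ≤ d0.getD k 0) :
    (∀ k, (l.foldl pvStep (d0, 0)).1.getD k 0 =
        if l.count k = 0 then d0.getD k 0 else max (d0.getD k 0 - l.count k) 0)
    ∧ (l.foldl pvStep (d0, 0)).2 =
        ((PySem.Set.ofList l).map (fun k => max 0 ((l.count k : Int) - d0.getD k 0))).sum := by
  induction l using List.reverseRecOn with
  | nil => simp [PySem.Set.ofList_nil]
  | append_singleton l x ih =>
    obtain ⟨ihd, ihw⟩ := ih (fun k hk => h0 k (List.mem_append_left _ hk))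
    have hnnx : 0 ≤ d0.getD x 0 := h0 x (List.mem_append_right _ List.mem_cons_self)
    simp only [List.foldl_append, List.foldl_cons, List.foldl_nil]
    set s := List.foldl pvStep (d0, 0) l with hs
    constructor
    · intro k
      by_cases hk : k = x
      · subst hk
        have ha := ihd k
        have hnn := hnnx
        have hc : (l ++ [k]).count k = l.count k + 1 := by simp
        rw [hc, if_neg (Nat.succ_ne_zero _)]
        unfold pvStep
        split_ifs with hpos
        · simp only [PySem.Dict.getD_insert_self]
          rw [ha] at hpos ⊢
          split_ifs at hpos ⊢ with h0'
          · omega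
          · push_cast; omega
        · rw [ha] at hpos
          rw [ha]
          split_ifs at hpos ⊢ with h0'
          · omega
          · push_cast at hpos ⊢; omega
      · have hc : (l ++ [x]).count k = l.count k := by
          simp [List.count_append, Ne.symm hk]
        rw [hc]
        have hstep : (pvStep s x).1.getD k 0 = s.1.getD k 0 := by
          unfold pvStep
          split_ifs <;> simp [PySem.Dict.getD_insert, hk]
        rw [hstep]
        exact ihd k
    · have hr := ihd x
      have hnn := hnnx
      unfold pvStep
      have hset : PySem.Set.ofList (l ++ [x]) = PySem.Set.add (PySem.Set.ofList l) x :=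
        PySem.Set.ofList_append_singleton l x
      by_cases hxl : x ∈ l
      · have hmem : x ∈ PySem.Set.ofList l := (PySem.Set.mem_ofList l x).mpr hxl
        have hcx : l.count x ≠ 0 := by simpa [List.count_eq_zero] using hxl
        have hupd := pv_sum_map_update
          (fun k => max 0 ((l.count k : Int) - d0.getD k 0))
          (fun k => max 0 (((l ++ [x]).count k : Int) - d0.getD k 0))
          (PySem.Set.ofList l) (PySem.Set.nodup_ofList l) x hmem
          (by
            intro k _ hkx
            simp [List.count_append, Ne.symm hkx])
        rw [hset, PySem.Set.add_of_mem hmem, hupd, ← ihw]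
        rw [if_neg hcx] at hr
        have hcx2 : (l ++ [x]).count x = l.count x + 1 := by simp
        simp only [hcx2]
        split_ifs with hpos
        · rw [hr] at hpos
          push_cast
          omega
        · rw [hr] at hpos
          push_cast at hpos ⊢
          omega
      · have hmem : x ∉ PySem.Set.ofList l := fun h => hxl ((PySem.Set.mem_ofList l x).mp h)
        have hcx : l.count x = 0 := by simpa [List.count_eq_zero] using hxl
        rw [hset, PySem.Set.add_of_not_mem hmem]
        have hmap : (PySem.Set.ofList l).map (fun k => max 0 (((l ++ [x]).count k : Int) - d0.getD k 0))
            = (PySem.Set.ofList l).map (fun k => max 0 ((l.count k : Int) - d0.getD k 0)) :=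
          List.map_congr_left (by
            intro k hk
            have hkx : k ≠ x := fun h => hmem (h ▸ hk)
            simp [List.count_append, Ne.symm hkx])
        rw [List.map_append, List.sum_append, hmap, ← ihw]
        rw [if_pos hcx] at hr
        have hc1 : (l ++ [x]).count x = 1 := by simp [hcx]
        split_ifs with hpos
        · rw [hr] at hpos
          simp
          omega
        · rw [hr] at hpos
          simp
          omega

-- A's fold over Counter items equals the per-distinct-letter deficit sum
lemma pv_afold (d0 : PySem.Dict String Int) (ps : List (String × Int)) (init : Int) :
    ps.foldl (fun acc p =>
      if d0.getD p.1 0 < p.2 then acc + (p.2 - d0.getD p.1 0) else acc) init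
    = init + (ps.map (fun p => max 0 (p.2 - d0.getD p.1 0))).sum := by
  induction ps generalizing init with
  | nil => simp
  | cons p ps ih =>
    simp only [List.foldl_cons, List.map_cons, List.sum_cons, ih]
    split_ifs with h <;>
      rcases max_cases 0 (p.2 - d0.getD p.1 0) with ⟨he, _⟩ | ⟨he, _⟩ <;> rw [he] <;> ring_nf <;> omega

-- the two accumulated wildcard counts coincide on a nonnegative pool
lemma pv_key (d0 : PySem.Dict String Int) (L : List String) (h0 : ∀ k ∈ L, 0 ≤ d0.getD k 0) :
    (PySem.Dict.counter L).items.foldl (fun acc p =>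
      if d0.getD p.1 0 < p.2 then acc + (p.2 - d0.getD p.1 0) else acc) 0
    = (L.foldl pvStep (d0, 0)).2 := by
  rw [(pv_bfold d0 L h0).2, pv_afold]
  simp [PySem.Dict.items_counter, List.map_map, Function.comp_def]

-- ===== VERDICT (by name: the statement is the Claim_ definition above) =====
theorem can_form_word_with_wildcards_py_spec : Claim_equal_can_form_word_with_wildcards_py := by
  intro word available_letters wildcards _ hpre
  unfold Spec_can_form_word_with_wildcards_py
  show decide
      (((PySem.Dict.counter ((PySem.Str.upper word).toList.map (fun c => c.toString))).items.foldl
        (fun acc p =>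
          if (PySem.Dict.mk available_letters).getD p.1 0 < p.2 then
            acc + (p.2 - (PySem.Dict.mk available_letters).getD p.1 0)
          else acc) 0) ≤ wildcards)
    = decide
      ((((PySem.Str.upper word).toList.map (fun c => c.toString)).foldl pvStep
          (PySem.Dict.mk available_letters, 0)).2 ≤ wildcards)
  have hpre' : ∀ c ∈ (PySem.Str.upper word).toList,
      0 ≤ (PySem.Dict.mk available_letters).getD c.toString 0 := by
    unfold Pre_can_form_word_with_wildcards_py at hpre
    simpa using hpre
  rw [pv_key _ _ (by
    intro k hk
    obtain ⟨c, hc, rfl⟩ := List.mem_map.mp hk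
    exact hpre' c hc)]
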